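-- pv_equiv track=rewrite | github.com/wonyoung-jang/logseq-analyzer | src/process_content_data.py | process_aliases
-- ===== SOURCE A (Python) =====
-- from typing import Any, Dict, List, Pattern, Set, Tuple
--
-- def process_aliases(aliases: str) -> List[str]:
--     """Process aliases to extract individual aliases."""
--     aliases = aliases.strip()
--     results = []
--     current = []
--     inside_brackets = False
--     i = 0
--     while i < len(aliases):
--         if aliases[i : i + 2] == "[[":
--             inside_brackets = True
--             i += 2
--         elif aliases[i : i + 2] == "]]":
--             inside_brackets = False
--             i += 2
--         elif aliases[i] == "," and not inside_brackets:
--             part = "".join(current).strip().lower()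
--             if part:
--                 results.append(part)
--             current = []
--             i += 1
--         else:
--             current.append(aliases[i])
--             i += 1
--
--     part = "".join(current).strip().lower()
--     if part:
--         results.append(part)
--     return results
-- ===== SOURCE B (Python) =====
-- from typing import List
--
--
-- def process_aliases(aliases: str) -> List[str]:
--     """Two-phase: one scan marks top-level commas with a NUL sentinel while
--     deleting bracket markers; then split/normalise/filter via str.split and
--     one comprehension."""
--     s = aliases.strip()
--     cleaned = []
--     inside = False
--     i = 0
--     n = len(s)
--     while i < n:
--         if s[i:i + 2] == "[[":
--             inside = True
--             i += 2
--         elif s[i:i + 2] == "]]":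
--             inside = False
--             i += 2
--         else:
--             cleaned.append("\0" if s[i] == "," and not inside else s[i])
--             i += 1
--     segs = "".join(cleaned).split("\0")
--     return [p for p in (seg.strip().lower() for seg in segs) if p]
-- ===== Notes on version B (the rewrite author's own statement) =====
-- stated objective: alternative
-- what changed: A's interleaved split-and-accumulate (per-character current buffer flushed at each top-level comma and at the end) is replaced by a sentinel pass that deletes bracket markers and marks top-level commas with NUL, followed by str.split on the sentinel plus one strip/lower/filter comprehension.
import Mathlib
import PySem

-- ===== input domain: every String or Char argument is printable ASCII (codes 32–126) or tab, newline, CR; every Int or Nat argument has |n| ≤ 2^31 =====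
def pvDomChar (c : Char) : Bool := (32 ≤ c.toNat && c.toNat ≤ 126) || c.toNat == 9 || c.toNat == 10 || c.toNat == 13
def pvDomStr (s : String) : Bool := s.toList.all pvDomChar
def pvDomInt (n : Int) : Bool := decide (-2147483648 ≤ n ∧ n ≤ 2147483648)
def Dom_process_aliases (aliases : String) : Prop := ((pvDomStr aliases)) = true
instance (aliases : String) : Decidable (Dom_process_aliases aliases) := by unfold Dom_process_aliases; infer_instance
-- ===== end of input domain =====

-- B replaces A's interleaved split-and-accumulate with a sentinel-marking scan
-- followed by a library split plus one strip/lower/filter pass (objective: alternative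
-- decomposition, same cost).

-- ===== PORT A =====
-- A's while loop: index scan with the 2-char '[['/']]' lookahead, a per-character
-- `current` buffer flushed at each top-level comma and once at the end.
def pvLoopA : List Char → List String → List Char → Bool → List String
  | '[' :: '[' :: rest, results, current, _ => pvLoopA rest results current true
  | ']' :: ']' :: rest, results, current, _ => pvLoopA rest results current false
  | ',' :: rest, results, current, inside =>
      if inside then pvLoopA rest results (current ++ [',']) inside
      else
        let part := PySem.Chars.lower (PySem.Chars.strip current)
        pvLoopA rest (if part ≠ [] then results ++ [String.ofList part] else results) [] inside
  | c :: rest, results, current, inside => pvLoopA rest results (current ++ [c]) inside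
  | [], results, current, _ =>
      let part := PySem.Chars.lower (PySem.Chars.strip current)
      if part ≠ [] then results ++ [String.ofList part] else results

def process_aliases (aliases : String) : List String :=
  pvLoopA (PySem.Chars.strip aliases.toList) [] [] false

-- ===== PORT B =====
-- B pass 1: same bracket-toggle detection, but only marks top-level commas with NUL
-- and drops bracket markers; no segment accumulator.
def pvClean : List Char → Bool → List Char
  | '[' :: '[' :: rest, _ => pvClean rest true
  | ']' :: ']' :: rest, _ => pvClean rest false
  | c :: rest, inside =>
      (if c = ',' ∧ inside = false then '\x00' else c) :: pvClean rest inside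
  | [], _ => []

-- B pass 2: "".join(cleaned).split("\0"), then strip/lower each piece and keep the
-- non-empty ones (the comprehension).
def process_aliases_alt (aliases : String) : List String :=
  (((PySem.Chars.splitOn (pvClean (PySem.Chars.strip aliases.toList) false) ['\x00']).map
      (fun seg => PySem.Chars.lower (PySem.Chars.strip seg))).filter (· ≠ [])).map String.ofList

-- ===== PRECONDITION & SPEC =====
def Spec_process_aliases (aliases : String) (out : List String) : Prop := out = process_aliases_alt aliases
instance (aliases : String) (out : List String) : Decidable (Spec_process_aliases aliases out) := by unfold Spec_process_aliases; infer_instance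

-- ===== CLAIM (what is proved, stated in full; the proofs are below) =====
def Claim_equal_process_aliases : Prop := ∀ (aliases : String), Dom_process_aliases aliases → Spec_process_aliases aliases (process_aliases aliases)

-- ===== LEMMAS AND PROOFS =====

-- reference single-character splitter: what str.split("\0") does
def pvSplitChar (c : Char) : List Char → List (List Char)
  | [] => [[]]
  | x :: xs =>
      if x = c then [] :: pvSplitChar c xs
      else match pvSplitChar c xs with
        | [] => [[x]]
        | h :: t => (x :: h) :: t

def pvMapHead (f : List Char → List Char) : List (List Char) → List (List Char)
  | [] => []
  | h :: t => f h :: t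

lemma pvSplitChar_ne_nil (c : Char) (l : List Char) : pvSplitChar c l ≠ [] := by
  cases l with
  | nil => simp [pvSplitChar]
  | cons x xs =>
      simp only [pvSplitChar]
      split <;> [skip; split] <;> simp_all

lemma pvSplitChar_cons_ne (c x : Char) (xs : List Char) (h : x ≠ c) :
    pvSplitChar c (x :: xs) = pvMapHead (x :: ·) (pvSplitChar c xs) := by
  simp only [pvSplitChar, if_neg h]
  cases hs : pvSplitChar c xs with
  | nil => exact absurd hs (pvSplitChar_ne_nil c xs)
  | cons hh tt => simp [pvMapHead]

lemma pvMapHead_mapHead (f g : List Char → List Char) (ls : List (List Char)) :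
    pvMapHead f (pvMapHead g ls) = pvMapHead (fun h => f (g h)) ls := by
  cases ls <;> simp [pvMapHead]

lemma pvMapHead_id (ls : List (List Char)) : pvMapHead (fun h => h) ls = ls := by
  cases ls <;> simp [pvMapHead]

-- characterisation of PySem.Chars.splitOn with a single-character separator
lemma pvSplitOn_go_char (c : Char) :
    ∀ (fuel : Nat) (l cur : List Char) (acc : List (List Char)), l.length < fuel →
      PySem.Chars.splitOn.go [c] fuel l cur acc
        = acc.reverse ++ pvMapHead (cur.reverse ++ ·) (pvSplitChar c l) := by
  intro fuel
  induction fuel with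
  | zero => intro l cur acc h; omega
  | succ fuel ih =>
      intro l cur acc h
      cases l with
      | nil => simp [PySem.Chars.splitOn.go, pvSplitChar, pvMapHead]
      | cons x rest =>
          by_cases hx : x = c
          · subst hx
            rw [PySem.Chars.splitOn.go]
            rw [if_pos (by simp [List.isPrefixOf])]
            simp only [List.length_cons, List.length_nil, List.drop_succ_cons, List.drop_zero]
            rw [ih rest [] (cur.reverse :: acc) (by simpa using Nat.lt_of_succ_lt_succ h)]
            rw [show pvSplitChar x (x :: rest) = [] :: pvSplitChar x rest from by simp [pvSplitChar]]
            rw [show pvMapHead (fun h => cur.reverse ++ h) ([] :: pvSplitChar x rest)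
                  = cur.reverse :: pvSplitChar x rest from by simp [pvMapHead]]
            simp [pvMapHead_id]
          · rw [PySem.Chars.splitOn.go]
            rw [if_neg (by simp [List.isPrefixOf]; exact fun hc => absurd hc.symm hx)]
            rw [ih rest (x :: cur) acc (by simpa using Nat.lt_of_succ_lt_succ h)]
            rw [pvSplitChar_cons_ne c x rest hx, pvMapHead_mapHead]
            simp

lemma pvSplitOn_char (c : Char) (l : List Char) :
    PySem.Chars.splitOn l [c] = pvSplitChar c l := by
  rw [show PySem.Chars.splitOn l [c] = PySem.Chars.splitOn.go [c] (l.length + 1) l [] [] from rfl]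
  rw [pvSplitOn_go_char c (l.length + 1) l [] [] (by omega)]
  simp [pvMapHead_id]

-- B's post-processing of a list of segments
def pvPost (ls : List (List Char)) : List String :=
  ((ls.map (fun seg => PySem.Chars.lower (PySem.Chars.strip seg))).filter (· ≠ [])).map String.ofList

lemma pvPost_cons (a : List Char) (ls : List (List Char)) :
    pvPost (a :: ls) = pvPost [a] ++ pvPost ls := by
  simp only [pvPost, List.map_cons, List.filter_cons, List.map_nil, List.filter_nil]
  split <;> simp

-- main invariant: A's loop equals B's clean-then-split-then-post on the rest
lemma pvMain :
    ∀ (s : List Char) (results : List String) (current : List Char) (inside : Bool),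
      '\x00' ∉ s →
      pvLoopA s results current inside
        = results ++ pvPost (pvMapHead (current ++ ·) (pvSplitChar '\x00' (pvClean s inside))) := by
  intro s results current inside hnul
  induction s, results, current, inside using pvLoopA.induct with
  | case1 rest results current _ ih =>
      rw [pvLoopA, ih (fun hm => hnul (by simp [hm]))]
      simp [pvClean]
  | case2 rest results current _ ih =>
      rw [pvLoopA, ih (fun hm => hnul (by simp [hm]))]
      simp [pvClean]
  | case3 rest results current ih =>
      rw [pvLoopA, if_pos rfl, ih (fun hm => hnul (by simp [hm]))]
      rw [show pvClean (',' :: rest) true = ',' :: pvClean rest true by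
            rw [pvClean]
            · simp
            · intro r h1 h2; exact absurd h1 (by decide)
            · intro r h1 h2; exact absurd h1 (by decide)]
      rw [pvSplitChar_cons_ne _ ',' _ (by decide), pvMapHead_mapHead]
      simp
  | case4 rest results current inside hin part ih =>
      rw [pvLoopA, if_neg hin, ih (fun hm => hnul (by simp [hm]))]
      simp only [Bool.not_eq_true] at hin
      subst hin
      rw [show pvClean (',' :: rest) false = '\x00' :: pvClean rest false by
            rw [pvClean]
            · simp
            · intro r h1 h2; exact absurd h1 (by decide)
            · intro r h1 h2; exact absurd h1 (by decide)]
      rw [show pvSplitChar '\x00' ('\x00' :: pvClean rest false)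
            = [] :: pvSplitChar '\x00' (pvClean rest false) by simp [pvSplitChar]]
      rw [show pvMapHead (fun x => current ++ x) ([] :: pvSplitChar '\x00' (pvClean rest false))
            = current :: pvSplitChar '\x00' (pvClean rest false) by simp [pvMapHead]]
      rw [pvPost_cons]
      have hpost : (if PySem.Chars.lower (PySem.Chars.strip current) ≠ [] then
            results ++ [String.ofList (PySem.Chars.lower (PySem.Chars.strip current))] else results)
          = results ++ pvPost [current] := by
        simp only [pvPost, List.map_cons, List.map_nil, List.filter]
        split <;> simp_all
      rw [hpost]
      simp [pvMapHead_id]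
  | case5 c rest results current inside h1 h2 h3 ih =>
      have hcnul : c ≠ '\x00' := fun h => hnul (by simp [h])
      rw [pvLoopA]
      · rw [ih (fun hm => hnul (by simp [hm]))]
        rw [show pvClean (c :: rest) inside = c :: pvClean rest inside by
              rw [pvClean]
              · have : ¬(c = ',' ∧ inside = false) := fun ⟨hc, _⟩ => h3 hc
                rw [if_neg this]
              · exact h1
              · exact h2]
        rw [pvSplitChar_cons_ne _ c _ hcnul, pvMapHead_mapHead]
        simp
      · exact h1
      · exact h2
      · exact h3
  | case6 results current inside part hp =>
      rw [pvLoopA]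
      have hp' : ¬(PySem.Chars.lower (PySem.Chars.strip current) = []) := hp
      simp only [pvClean, pvSplitChar, pvMapHead, pvPost]
      rw [if_pos hp]
      simp [hp']
  | case7 results current inside part hp =>
      rw [pvLoopA]
      simp only [ne_eq, Decidable.not_not] at hp
      have hp' : PySem.Chars.lower (PySem.Chars.strip current) = [] := hp
      simp only [pvClean, pvSplitChar, pvMapHead, pvPost]
      rw [if_neg (by simp [hp'])]
      simp [hp']

lemma pvNoNul_strip (l : List Char) (h : l.all pvDomChar = true) :
    '\x00' ∉ PySem.Chars.strip l := by
  intro hmem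
  have h1 : '\x00' ∈ l := by
    simp only [PySem.Chars.strip, PySem.Chars.rstrip, PySem.Chars.lstrip, List.mem_reverse] at hmem
    have h2 : '\x00' ∈ (List.dropWhile PySem.Chars.isspace l).reverse :=
      List.Sublist.mem hmem (List.dropWhile_sublist _)
    rw [List.mem_reverse] at h2
    exact List.Sublist.mem h2 (List.dropWhile_sublist _)
  rw [List.all_eq_true] at h
  have := h _ h1
  simp [pvDomChar] at this

-- ===== VERDICT (by name: the statement is the Claim_ definition above) =====
theorem process_aliases_spec : Claim_equal_process_aliases := by
  intro aliases hdom
  unfold Spec_process_aliases process_aliases process_aliases_alt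
  rw [pvSplitOn_char, pvMain _ _ _ _ (pvNoNul_strip _ hdom)]
  simp [pvMapHead_id, pvPost]
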